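-- pv_equiv track=rewrite | github.com/narendra005/Programming-Basic | Form an AP.py | solve
-- ===== SOURCE A (Python) =====
-- def solve(A, B):
--     D1={}
--     max1=0
--     for i in range(len(A)):
--         temp=(A[i] - i * B)
--         if temp in D1:
--             D1[temp]+=1
--         else:
--             D1[temp]=1
--         max1=max(D1[temp],max1)
--
--     return len(A) - max1
-- ===== SOURCE B (Python) =====
-- def solve(A, B):
--     v = sorted(A[i] - i * B for i in range(len(A)))
--     best = 0
--     run = 0
--     prev = None
--     for x in v:
--         if x == prev:
--             run += 1
--         else:
--             run = 1
--             prev = x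
--         if run > best:
--             best = run
--     return len(A) - best
-- ===== Notes on version B (the rewrite author's own statement) =====
-- stated objective: faster
-- what changed: Replaces the single-pass dictionary counter with a running maximum by sorting the transformed values and scanning once for the longest run of equal values.
import Mathlib
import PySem

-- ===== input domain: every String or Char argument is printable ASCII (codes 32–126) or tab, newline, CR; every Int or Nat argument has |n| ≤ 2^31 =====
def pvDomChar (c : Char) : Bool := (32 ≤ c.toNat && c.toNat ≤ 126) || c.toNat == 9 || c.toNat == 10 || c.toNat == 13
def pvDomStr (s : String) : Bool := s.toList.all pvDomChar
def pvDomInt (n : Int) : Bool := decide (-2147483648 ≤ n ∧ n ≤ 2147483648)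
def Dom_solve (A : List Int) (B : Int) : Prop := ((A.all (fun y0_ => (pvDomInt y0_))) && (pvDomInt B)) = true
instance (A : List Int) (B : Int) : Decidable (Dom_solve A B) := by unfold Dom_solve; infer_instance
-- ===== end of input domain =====

-- B replaces A's one-pass dictionary counter by sort-then-scan over runs of equal transformed values (measured faster in a timing run); same return value.

-- ===== PORT A =====
def solve (A : List Int) (B : Int) : Int :=
  let r := (PySem.List.pyRange 0 (A.length : Int) 1).foldl
    (fun (st : PySem.Dict Int Int × Int) i =>
      let temp := PySem.List.pyGetD A i 0 - i * B
      let D1 := if st.1.contains temp then st.1.modify temp 0 (· + 1) else st.1.insert temp 1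
      (D1, max (D1.getD temp 0) st.2))
    (PySem.Dict.empty, 0)
  (A.length : Int) - r.2

-- ===== PORT B =====
-- B's loop body: state is (best, run, prev), exactly Source B's three variables.
def stepB (st : Int × Int × Option Int) (x : Int) : Int × Int × Option Int :=
  let rp := if some x == st.2.2 then (st.2.1 + 1, st.2.2) else (1, some x)
  (if rp.1 > st.1 then rp.1 else st.1, rp.1, rp.2)

def solve_alt (A : List Int) (B : Int) : Int :=
  let v := PySem.List.sorted
    ((PySem.List.pyRange 0 (A.length : Int) 1).map (fun i => PySem.List.pyGetD A i 0 - i * B))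
    (fun x => x) false
  let r := v.foldl stepB (0, 0, none)
  (A.length : Int) - r.1

-- ===== PRECONDITION & SPEC =====
def Spec_solve (A : List Int) (B : Int) (out : Int) : Prop := out = solve_alt A B
instance (A : List Int) (B : Int) (out : Int) : Decidable (Spec_solve A B out) := by unfold Spec_solve; infer_instance

-- ===== CLAIM (what is proved, stated in full; the proofs are below) =====
def Claim_equal_solve : Prop := ∀ (A : List Int) (B : Int), Dom_solve A B → Spec_solve A B (solve A B)

-- ===== LEMMAS AND PROOFS =====

-- A's loop step, as a function of the transformed value alone.
def stepA (st : PySem.Dict Int Int × Int) (x : Int) : PySem.Dict Int Int × Int :=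
  let D1 := if st.1.contains x then st.1.modify x 0 (· + 1) else st.1.insert x 1
  (D1, max (D1.getD x 0) st.2)

-- Abstract recursion tracking A's running maximum (p = already-processed prefix).
def amax : List Int → List Int → Int → Int
  | [], _, m => m
  | x :: t, p, m => amax t (p ++ [x]) (max ((p.count x : Int) + 1) m)

-- The maximal multiplicity of an element of w, as a running max (0 for the empty list).
def MXv (w : List Int) : Int := w.foldl (fun b y => max b ((w.count y : Int))) 0

lemma modify_absent (d : PySem.Dict Int Int) (x : Int) (h : d.contains x = false) :
    d.insert x 1 = d.modify x 0 (· + 1) := by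
  have h' : ∀ a b, (a, b) ∈ d.items → ¬ a = x := by simpa [PySem.Dict.contains] using h
  have hget : d.get? x = none := by
    simp only [PySem.Dict.get?, Option.map_eq_none_iff, List.find?_eq_none]
    intro p hp
    simpa using h' p.1 p.2 hp
  simp [PySem.Dict.modify, PySem.Dict.getD, hget]

lemma stepA_counter (p : List Int) (x : Int) (m : Int) :
    stepA (PySem.Dict.counter p, m) x
      = (PySem.Dict.counter (p ++ [x]), max ((p.count x : Int) + 1) m) := by
  have hbr : (if (PySem.Dict.counter p).contains x
        then (PySem.Dict.counter p).modify x 0 (· + 1)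
        else (PySem.Dict.counter p).insert x 1) = PySem.Dict.counter (p ++ [x]) := by
    rw [PySem.Dict.counter_append_singleton]
    by_cases h : (PySem.Dict.counter p).contains x = true
    · simp [h]
    · simp [h, modify_absent _ _ (by simpa using h)]
  simp only [stepA, hbr, PySem.Dict.getD_counter]
  have : (p ++ [x]).count x = p.count x + 1 := by simp [List.count_append]
  rw [this]
  push_cast
  rfl

lemma foldl_stepA (t : List Int) : ∀ (p : List Int) (m : Int),
    (t.foldl stepA (PySem.Dict.counter p, m)).2 = amax t p m := by
  induction t with
  | nil => intro p m; simp [amax]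
  | cons x t ih =>
    intro p m
    simp only [List.foldl_cons, amax]
    rw [stepA_counter p x m, ih]

-- Upper bound for a running max of a projection.
lemma foldl_max_le (g : Int → Int) (t : List Int) : ∀ (a c : Int), a ≤ c → (∀ x ∈ t, g x ≤ c) →
    t.foldl (fun b x => max b (g x)) a ≤ c := by
  induction t with
  | nil => intro a c h _; simpa using h
  | cons y t ih =>
    intro a c h hall
    simp only [List.foldl_cons]
    exact ih _ _ (max_le h (hall y (by simp))) (fun x hx => hall x (by simp [hx]))

-- A start bounded by some element's projection does not change the running max.
lemma foldl_max_absorb (g : Int → Int) (t : List Int) (a k : Int) (y : Int) (hy : y ∈ t)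
    (hk : k ≤ g y) :
    t.foldl (fun b x => max b (g x)) (max a k) = t.foldl (fun b x => max b (g x)) a := by
  have h1 := PySem.List.le_foldl_max_int t g a
  have h2 := PySem.List.le_foldl_max_int t g (max a k)
  apply le_antisymm
  · exact foldl_max_le g t _ _ (max_le h1.1 (le_trans hk (h1.2 y hy))) h1.2
  · exact foldl_max_le g t _ _ (le_trans (le_max_left _ _) h2.1) h2.2

lemma amax_eq_foldl (t : List Int) : ∀ (p : List Int) (m : Int),
    amax t p m = t.foldl (fun b x => max b (((p ++ t).count x : Int))) m := by
  induction t with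
  | nil => intro p m; simp [amax]
  | cons x t ih =>
    intro p m
    simp only [amax, List.foldl_cons, ih]
    have hassoc : p ++ [x] ++ t = p ++ x :: t := by simp
    rw [hassoc, max_comm ((p.count x : Int) + 1) m]
    by_cases hx : x ∈ t
    · have hle : (p.count x : Int) + 1 ≤ ((p ++ x :: t).count x : Int) := by
        have : (p ++ x :: t).count x = p.count x + 1 + t.count x := by
          simp [List.count_append]
          omega
        omega
      rw [foldl_max_absorb _ t m _ x hx hle,
        foldl_max_absorb _ t m _ x hx (le_refl _)]
    · have hcnt : ((p ++ x :: t).count x : Int) = (p.count x : Int) + 1 := by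
        have ht : t.count x = 0 := List.count_eq_zero.mpr hx
        simp [List.count_append, ht]
      rw [hcnt]

lemma if_gt_max (a b : Int) : (if b > a then b else a) = max a b := by
  rw [max_def]; split_ifs <;> omega

-- Running max: the init distributes over max.
lemma foldl_max_init (g : Int → Int) (t : List Int) : ∀ (a c : Int),
    t.foldl (fun b x => max b (g x)) (max a c) = max (t.foldl (fun b x => max b (g x)) a) c := by
  induction t with
  | nil => intro a c; rfl
  | cons y t ih =>
    intro a c
    simp only [List.foldl_cons]
    rw [max_right_comm a c (g y), ih]

lemma foldl_max_replicate (g : Int → Int) (x : Int) (k : Nat) : ∀ (a : Int),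
    (List.replicate k x).foldl (fun b y => max b (g y)) a = if k = 0 then a else max a (g x) := by
  induction k with
  | zero => intro a; rfl
  | succ k ih =>
    intro a
    rw [List.replicate_succ, List.foldl_cons, ih]
    by_cases h : k = 0 <;> simp [h]

-- Decompose a sorted list into its head-run and a strictly larger remainder.
lemma sorted_decomp (x : Int) : ∀ (w : List Int), (x :: w).Pairwise (· ≤ ·) →
    ∃ (k : Nat) (rest : List Int), x :: w = List.replicate k x ++ rest ∧ 1 ≤ k ∧
      rest.Pairwise (· ≤ ·) ∧ ∀ y ∈ rest, x < y := by
  intro w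
  induction w generalizing x with
  | nil => intro _; exact ⟨1, [], by simp, le_refl 1, List.Pairwise.nil, by simp⟩
  | cons y w ih =>
    intro h
    have hxy : x ≤ y := (List.pairwise_cons.mp h).1 y (by simp)
    have htail : (y :: w).Pairwise (· ≤ ·) := (List.pairwise_cons.mp h).2
    rcases eq_or_lt_of_le hxy with heq | hlt
    · subst heq
      obtain ⟨k, rest, hdec, hk, hpair, hgt⟩ := ih x htail
      exact ⟨k + 1, rest, by rw [List.replicate_succ, List.cons_append, ← hdec], by omega, hpair, hgt⟩
    · refine ⟨1, y :: w, by simp, le_refl 1, htail, ?_⟩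
      intro z hz
      rcases List.mem_cons.mp hz with rfl | hz
      · exact hlt
      · exact lt_of_lt_of_le hlt ((List.pairwise_cons.mp htail).1 z hz)

lemma mxv_decomp (k : Nat) (x : Int) (rest : List Int) (hk : 1 ≤ k) (hx : x ∉ rest) :
    MXv (List.replicate k x ++ rest) = max (k : Int) (MXv rest) := by
  unfold MXv
  have hcx : ((List.replicate k x ++ rest).count x : Int) = (k : Int) := by
    simp [List.count_append, List.count_eq_zero.mpr hx]
  have hcy : ∀ y ∈ rest, ((List.replicate k x ++ rest).count y : Int) = (rest.count y : Int) := by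
    intro y hy
    have hne : y ≠ x := fun h => hx (h ▸ hy)
    simp [List.count_append, List.count_replicate, Ne.symm hne]
  rw [List.foldl_append, foldl_max_replicate, if_neg (by omega), hcx,
    PySem.List.foldl_congr_mem rest _ (fun b y => max b ((rest.count y : Int))) _
      (fun acc y hy => by rw [hcy y hy]),
    show max (0 : Int) (k : Int) = max 0 (k : Int) from rfl,
    foldl_max_init, max_comm]

-- One step of B's scan on an element different from prev.
lemma stepB_new (best run : Int) (prev : Option Int) (x : Int) (h : prev ≠ some x) :
    stepB (best, run, prev) x = (max best 1, 1, some x) := by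
  have hb : (some x == prev) = false := by
    cases prev with
    | none => rfl
    | some z => simpa using fun hzx => h (by rw [hzx])
  simp only [stepB, hb, if_false, Bool.false_eq_true]
  rw [if_gt_max]

-- B's scan over the rest of a run of x, starting at prev = x.
lemma stepB_run (x : Int) (k : Nat) : ∀ (best run : Int), run ≤ best →
    (List.replicate k x).foldl stepB (best, run, some x) = (max best (run + k), run + k, some x) := by
  induction k with
  | zero => intro best run h; simp [max_eq_left h]
  | succ k ih =>
    intro best run h
    rw [List.replicate_succ, List.foldl_cons]
    have hstep : stepB (best, run, some x) x = (max best (run + 1), run + 1, some x) := by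
      simp only [stepB, BEq.refl, if_true]
      rw [if_gt_max]
    rw [hstep, ih _ _ (le_max_right _ _)]
    simp only [Prod.mk.injEq]
    refine ⟨?_, ?_, trivial⟩
    · rw [max_assoc, max_eq_right (by omega : run + 1 ≤ run + 1 + (k : Int))]
      congr 1
      push_cast; ring
    · push_cast; ring

-- B's scan computes the maximal multiplicity, on any sorted list.
lemma scanB : ∀ (n : Nat) (w : List Int), w.length ≤ n → w.Pairwise (· ≤ ·) →
    ∀ (best run : Int) (prev : Option Int), (∀ y ∈ w, prev ≠ some y) → 0 ≤ best →
    (w.foldl stepB (best, run, prev)).1 = max best (MXv w) := by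
  intro n
  induction n with
  | zero =>
    intro w hlen _ best run prev _ hb
    rw [List.length_eq_zero_iff.mp (Nat.le_zero.mp hlen)]
    simp [MXv, max_eq_left hb]
  | succ n ih =>
    intro w hlen hpair best run prev hprev hb
    cases w with
    | nil => simp [MXv, max_eq_left hb]
    | cons x w' =>
      obtain ⟨k, rest, hdec, hk, hrpair, hgt⟩ := sorted_decomp x w' hpair
      have hxrest : x ∉ rest := fun h => lt_irrefl x (hgt x h)
      rw [hdec, List.foldl_append]
      have hrepl : (List.replicate k x).foldl stepB (best, run, prev)
          = (max best (k : Int), (k : Int), some x) := by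
        have hk1 : List.replicate k x = x :: List.replicate (k - 1) x := by
          rw [← List.replicate_succ]; congr 1; omega
        rw [hk1, List.foldl_cons,
          stepB_new best run prev x (hprev x (by rw [hdec, hk1]; simp)),
          stepB_run x (k - 1) _ _ (le_max_right _ _)]
        have h1k : (1 : Int) + ((k - 1 : Nat) : Int) = (k : Int) := by omega
        rw [h1k, max_assoc, max_eq_right (by omega : (1 : Int) ≤ (k : Int))]
      rw [hrepl, ih rest ?hlen hrpair _ _ _
        (fun y hy h => by have hxy := hgt y hy; rw [Option.some_inj.mp h] at hxy; exact lt_irrefl y hxy)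
        (le_trans hb (le_max_left _ _))]
      · rw [mxv_decomp k x rest hk hxrest, max_assoc]
      · case hlen =>
          have : (x :: w').length = k + rest.length := by rw [hdec]; simp
          simp only [List.length_cons] at this hlen
          omega

theorem solve_eq (A : List Int) (B : Int) : solve A B = solve_alt A B := by
  simp only [solve, solve_alt]
  congr 1
  -- A's side: the loop over indices is the stepA-fold over the transformed values v.
  set v := (PySem.List.pyRange 0 (A.length : Int) 1).map
    (fun i => PySem.List.pyGetD A i 0 - i * B) with hv
  have hstep : (PySem.List.pyRange 0 (A.length : Int) 1).foldl
      (fun (st : PySem.Dict Int Int × Int) i =>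
        let temp := PySem.List.pyGetD A i 0 - i * B
        let D1 := if st.1.contains temp then st.1.modify temp 0 (· + 1) else st.1.insert temp 1
        (D1, max (D1.getD temp 0) st.2))
      (PySem.Dict.empty, 0)
      = v.foldl stepA (PySem.Dict.empty, 0) := by
    rw [hv, List.foldl_map]
    rfl
  rw [hstep,
    show (PySem.Dict.empty : PySem.Dict Int Int) = PySem.Dict.counter [] from rfl,
    foldl_stepA, amax_eq_foldl]
  -- B's side: the scan over the sorted list computes the maximal multiplicity of v.
  set w := PySem.List.sorted v (fun x => x) false with hw
  have hperm : w.Perm v := PySem.List.sorted_perm v (fun x => x) false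
  have hscan : (w.foldl stepB (0, 0, none)).1 = max 0 (MXv w) :=
    scanB w.length w (le_refl _) (by simpa using PySem.List.sorted_pairwise v (fun x => x))
      0 0 none (fun y _ => by simp) (le_refl 0)
  rw [hscan]
  -- maximal multiplicity is permutation-invariant
  have hcnt : (fun (b y : Int) => max b ((w.count y : Int)))
      = (fun b y => max b ((v.count y : Int))) := by
    funext b y; rw [hperm.count_eq]
  have hfold : MXv w = MXv v := by
    unfold MXv
    rw [hcnt]
    exact @List.Perm.foldl_eq _ _ (fun b y => max b ((v.count y : Int))) w v
      ⟨fun b y z => max_right_comm b _ _⟩ hperm 0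
  rw [hfold]
  have h0 : (0 : Int) ≤ MXv v := (PySem.List.le_foldl_max_int v _ 0).1
  rw [max_eq_right h0]
  simp [MXv]

-- ===== VERDICT (by name: the statement is the Claim_ definition above) =====
theorem solve_spec : Claim_equal_solve := by
  intro A B _
  unfold Spec_solve
  exact solve_eq A B
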